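-- pv_equiv track=rewrite | github.com/kazamazza/pokerai | ml/etl/monker_manifest.py | parse_filename_sequence
-- ===== SOURCE A (Python) =====
-- from typing import List, Dict, Any
--
-- POS_NAMES = {
--     "UTG", "LJ", "HJ", "CO", "BTN", "SB", "BB", "EP", "MP", "BU"  # include common aliases
-- }
--
-- ACTION_NORMALIZE = {
--     "AI": "ALL_IN",
--     "Jam": "ALL_IN",
--     "Allin": "ALL_IN",
--     "Call": "CALL",
--     "Raise": "RAISE",
--     "Bet": "BET",
--     "Check": "CHECK",
--     "Cbet": "CBET",
--     "Donk": "DONK",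
--     "Open": "OPEN",
--     "Limp": "LIMP",
--     "3Bet": "3BET",
--     "4Bet": "4BET",
--     "5Bet": "5BET",
--     "Fold": "FOLD",
-- }
--
-- def normalize_action(tok: str) -> str:
--     return ACTION_NORMALIZE.get(tok, tok)  # keep unknowns as-is
--
-- def parse_filename_sequence(stem: str) -> List[Dict[str, str]]:
--     """
--     Parse names like: UTG_AI_HJ_Call_CO_Call_BTN_Call_SB_Call_BB_Call
--     into: [{"pos":"UTG","action":"ALL_IN"}, {"pos":"HJ","action":"CALL"}, ...]
--     We assume tokens alternate as POS, ACTION, POS, ACTION, ...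
--     If ACTION is missing after a POS, we record action=None.
--     """
--     toks = stem.split("_")
--     seq: List[Dict[str, str]] = []
--     i = 0
--     while i < len(toks):
--         pos = toks[i]
--         if pos not in POS_NAMES:
--             # Not a position? Just skip this token (robustness)
--             i += 1
--             continue
--         action = None
--         if i + 1 < len(toks) and toks[i + 1] not in POS_NAMES:
--             action = normalize_action(toks[i + 1])
--             i += 2
--         else:
--             i += 1
--         entry = {"pos": pos}
--         if action is not None:
--             entry["action"] = action
--         seq.append(entry)
--     return seq
-- ===== SOURCE B (Python) =====
-- from typing import List, Dict
--
-- POS_NAMES = {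
--     "UTG", "LJ", "HJ", "CO", "BTN", "SB", "BB", "EP", "MP", "BU"
-- }
--
-- ACTION_NORMALIZE = {
--     "AI": "ALL_IN",
--     "Jam": "ALL_IN",
--     "Allin": "ALL_IN",
--     "Call": "CALL",
--     "Raise": "RAISE",
--     "Bet": "BET",
--     "Check": "CHECK",
--     "Cbet": "CBET",
--     "Donk": "DONK",
--     "Open": "OPEN",
--     "Limp": "LIMP",
--     "3Bet": "3BET",
--     "4Bet": "4BET",
--     "5Bet": "5BET",
--     "Fold": "FOLD",
-- }
--
-- def parse_filename_sequence(stem: str) -> List[Dict[str, str]]: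
--     """Single forward pass with a pending-position accumulator (no index lookahead)."""
--     seq: List[Dict[str, str]] = []
--     pending = None
--     for tok in stem.split("_"):
--         if tok in POS_NAMES:
--             if pending is not None:
--                 seq.append({"pos": pending})
--             pending = tok
--         elif pending is not None:
--             seq.append({"pos": pending, "action": ACTION_NORMALIZE.get(tok, tok)})
--             pending = None
--     if pending is not None:
--         seq.append({"pos": pending})
--     return seq
-- ===== Notes on version B (the rewrite author's own statement) =====
-- stated objective: alternative
-- what changed: Replaced the index-jumping while-loop with lookahead (toks[i+1]) by a single for-loop over tokens that keeps a pending-position accumulator and emits entries on lookback, with a final flush.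
import Mathlib
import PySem

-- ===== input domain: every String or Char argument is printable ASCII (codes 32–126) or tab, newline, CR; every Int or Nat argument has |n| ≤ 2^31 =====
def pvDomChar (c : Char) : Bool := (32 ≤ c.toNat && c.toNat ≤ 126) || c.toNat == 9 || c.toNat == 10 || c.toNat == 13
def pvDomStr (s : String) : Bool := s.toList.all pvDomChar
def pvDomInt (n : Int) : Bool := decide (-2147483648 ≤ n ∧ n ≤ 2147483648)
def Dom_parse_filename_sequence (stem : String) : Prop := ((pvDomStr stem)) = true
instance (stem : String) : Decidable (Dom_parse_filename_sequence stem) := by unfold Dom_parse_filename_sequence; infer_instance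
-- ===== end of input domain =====

-- B replaces A's index-jumping while-loop (lookahead toks[i+1]) by a single fold with a
-- pending-position accumulator and a final flush; objective: alternative decomposition.

-- shared module-level constants (same module in both Pythons)
def POS_NAMES : PySem.Set String :=
  PySem.Set.ofList ["UTG", "LJ", "HJ", "CO", "BTN", "SB", "BB", "EP", "MP", "BU"]

def ACTION_NORMALIZE : PySem.Dict String String :=
  PySem.Dict.ofList [("AI", "ALL_IN"), ("Jam", "ALL_IN"), ("Allin", "ALL_IN"),
    ("Call", "CALL"), ("Raise", "RAISE"), ("Bet", "BET"), ("Check", "CHECK"),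
    ("Cbet", "CBET"), ("Donk", "DONK"), ("Open", "OPEN"), ("Limp", "LIMP"),
    ("3Bet", "3BET"), ("4Bet", "4BET"), ("5Bet", "5BET"), ("Fold", "FOLD")]

def normalize_action (tok : String) : String := ACTION_NORMALIZE.getD tok tok

-- ===== PORT A =====
-- A's while-loop over index i, transcribed as recursion on the remaining tokens:
-- 'i += 1' drops one token, 'i += 2' drops two.
def parseLoopA : List String → List (List (String × String))
  | [] => []
  | pos :: rest =>
    if ¬ (POS_NAMES.contains pos) then parseLoopA rest
    else
      match rest with
      | nxt :: rest2 =>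
        if ¬ (POS_NAMES.contains nxt) then
          [("pos", pos), ("action", normalize_action nxt)] :: parseLoopA rest2
        else
          [("pos", pos)] :: parseLoopA (nxt :: rest2)
      | [] => [("pos", pos)] :: parseLoopA []

def parse_filename_sequence (stem : String) : List (List (String × String)) :=
  parseLoopA ((PySem.Chars.splitOn stem.toList "_".toList).map String.ofList)

-- ===== PORT B =====
-- B's single fold: state = (emitted entries, pending position), then a final flush.
def stepB (st : List (List (String × String)) × Option String) (tok : String) :
    List (List (String × String)) × Option String :=
  if POS_NAMES.contains tok then
    match st.2 with
    | some p => (st.1 ++ [[("pos", p)]], some tok)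
    | none => (st.1, some tok)
  else
    match st.2 with
    | some p => (st.1 ++ [[("pos", p), ("action", normalize_action tok)]], none)
    | none => (st.1, none)

def flushB (st : List (List (String × String)) × Option String) :
    List (List (String × String)) :=
  match st.2 with
  | some p => st.1 ++ [[("pos", p)]]
  | none => st.1

def parse_filename_sequence_alt (stem : String) : List (List (String × String)) :=
  flushB (((PySem.Chars.splitOn stem.toList "_".toList).map String.ofList).foldl stepB ([], none))

-- ===== PRECONDITION & SPEC =====
def Spec_parse_filename_sequence (stem : String) (out : List (List (String × String))) : Prop := out = parse_filename_sequence_alt stem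
instance (stem : String) (out : List (List (String × String))) : Decidable (Spec_parse_filename_sequence stem out) := by unfold Spec_parse_filename_sequence; infer_instance

-- ===== CLAIM (what is proved, stated in full; the proofs are below) =====
def Claim_equal_parse_filename_sequence : Prop := ∀ (stem : String), Dom_parse_filename_sequence stem → Spec_parse_filename_sequence stem (parse_filename_sequence stem)

-- ===== LEMMAS AND PROOFS =====

-- Loop invariant, both pending states at once:
-- with no pending position, the fold-then-flush produces acc ++ parseLoopA toks;
-- with pending p (p a position name), it produces acc ++ parseLoopA (p :: toks).
theorem loop_inv (toks : List String) :
    (∀ acc, flushB (toks.foldl stepB (acc, none)) = acc ++ parseLoopA toks) ∧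
    (∀ acc p, p ∈ POS_NAMES →
      flushB (toks.foldl stepB (acc, some p)) = acc ++ parseLoopA (p :: toks)) := by
  induction toks with
  | nil =>
    refine ⟨fun acc => by simp [flushB, parseLoopA], fun acc p hp => ?_⟩
    simp [flushB, parseLoopA, hp]
  | cons tok rest ih =>
    refine ⟨fun acc => ?_, fun acc p hp => ?_⟩
    · by_cases h : tok ∈ POS_NAMES
      · simpa [List.foldl_cons, stepB, h] using ih.2 acc tok h
      · simp only [List.foldl_cons, stepB, PySem.Set.contains_eq_listContains,
          List.contains_eq_mem, h, decide_false, Bool.false_eq_true,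
          if_false]
        rw [ih.1 acc]
        rcases rest with _ | ⟨n2, r2⟩ <;> simp [parseLoopA, h]
    · by_cases h : tok ∈ POS_NAMES
      · have h2 := ih.2 (acc ++ [[("pos", p)]]) tok h
        simp only [List.foldl_cons, stepB, PySem.Set.contains_eq_listContains,
          List.contains_eq_mem, h, decide_true, if_pos] at h2 ⊢
        rw [h2]
        simp [parseLoopA, h, hp]
      · have h1 := ih.1 (acc ++ [[("pos", p), ("action", normalize_action tok)]])
        simp only [List.foldl_cons, stepB, PySem.Set.contains_eq_listContains,
          List.contains_eq_mem, h, decide_false, Bool.false_eq_true, if_false] at h1 ⊢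
        rw [h1]
        by_cases hr : rest = [] <;> simp [parseLoopA, h, hp]

-- ===== VERDICT (by name: the statement is the Claim_ definition above) =====
theorem parse_filename_sequence_spec : Claim_equal_parse_filename_sequence := by
  intro stem _
  unfold Spec_parse_filename_sequence parse_filename_sequence parse_filename_sequence_alt
  exact ((loop_inv ((PySem.Chars.splitOn stem.toList "_".toList).map String.ofList)).1 []).symm
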